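-- pv_equiv track=rewrite | github.com/skku-algostudy/algostudy-python | week3/준우/PG#42840 - 모의고사/solution.py | solution
-- ===== SOURCE A (Python) =====
-- sp1 = [1, 2, 3, 4, 5]
--
-- sp2 = [2, 1, 2, 3, 2, 4, 2, 5]
--
-- sp3 = [3, 3, 1, 1, 2, 2, 4, 4, 5, 5]
--
-- def solution(answers):
--     n = len(answers)
--     i1 = i2 = i3 = 0
--     an1 = an2 = an3 = 0
--     for i in range(n):
--         a = answers[i]
--         if a == sp1[i1]:
--             an1 += 1
--         if a == sp2[i2]:
--             an2 += 1
--         if a == sp3[i3]: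
--             an3 += 1
--         i1 = 0 if i1 == 4 else i1+1
--         i2 = 0 if i2 == 7 else i2+1
--         i3 = 0 if i3 == 9 else i3+1
--
--     max_score = max(an1, an2, an3)
--     answers = []
--     if an1 == max_score:
--         answers.append(1)
--     if an2 == max_score:
--         answers.append(2)
--     if an3 == max_score:
--         answers.append(3)
--
--     return answers
-- ===== SOURCE B (Python) =====
-- sp1 = [1, 2, 3, 4, 5]
-- sp2 = [2, 1, 2, 3, 2, 4, 2, 5]
-- sp3 = [3, 3, 1, 1, 2, 2, 4, 4, 5, 5]
--
-- def solution(answers):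
--     # residue-class decomposition: positions congruent to r mod len(p) all expect
--     # the same answer p[r], so each pattern's score is a sum of strided-slice counts
--     scores = []
--     for p in (sp1, sp2, sp3):
--         L = len(p)
--         scores.append(sum(answers[r::L].count(p[r]) for r in range(L)))
--     best = max(scores)
--     return [i + 1 for i, s in enumerate(scores) if s == best]
-- ===== Notes on version B (the rewrite author's own statement) =====
-- stated objective: alternative
-- what changed: Replaces A's fused per-element loop with three hand-maintained wrap-around counters by a residue-class decomposition: each pattern position r contributes list.count of the single expected value p[r] over the strided slice answers[r::len(p)], summed per pattern; no per-element comparison against a cyclic pattern remains.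
import Mathlib
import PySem

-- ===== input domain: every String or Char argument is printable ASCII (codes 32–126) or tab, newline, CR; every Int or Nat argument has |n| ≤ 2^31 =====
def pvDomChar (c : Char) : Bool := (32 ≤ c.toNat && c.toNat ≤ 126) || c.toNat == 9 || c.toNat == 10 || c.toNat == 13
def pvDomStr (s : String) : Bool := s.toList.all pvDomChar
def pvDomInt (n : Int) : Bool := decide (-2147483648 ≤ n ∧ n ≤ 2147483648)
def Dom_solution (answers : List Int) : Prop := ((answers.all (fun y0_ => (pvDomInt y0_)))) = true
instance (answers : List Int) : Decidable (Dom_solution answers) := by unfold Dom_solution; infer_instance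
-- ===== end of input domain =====

-- B scores each pattern by residue classes — for each pattern position r it counts the
-- single expected value p[r] in the strided slice answers[r::len(p)] — instead of A's
-- fused per-element loop with three hand-maintained wrap-around counters (objective: alternative).

def sp1L : List Int := [1, 2, 3, 4, 5]
def sp2L : List Int := [2, 1, 2, 3, 2, 4, 2, 5]
def sp3L : List Int := [3, 3, 1, 1, 2, 2, 4, 4, 5, 5]

-- ===== PORT A =====
-- A's `for i in range(n): a = answers[i]` walks the list once; ported as structural
-- recursion over the list carrying A's six loop variables. sp-index accesses are
-- always in range (counters stay below the pattern length), so getD is exact.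
def loopA : List Int → Nat → Nat → Nat → Int → Int → Int → Int × Int × Int
  | [], _, _, _, an1, an2, an3 => (an1, an2, an3)
  | a :: t, i1, i2, i3, an1, an2, an3 =>
      loopA t (if i1 = 4 then 0 else i1 + 1) (if i2 = 7 then 0 else i2 + 1)
        (if i3 = 9 then 0 else i3 + 1)
        (if a = sp1L.getD i1 0 then an1 + 1 else an1)
        (if a = sp2L.getD i2 0 then an2 + 1 else an2)
        (if a = sp3L.getD i3 0 then an3 + 1 else an3)

def solution (answers : List Int) : List Int :=
  let r := loopA answers 0 0 0 0 0 0
  let maxScore := max r.1 (max r.2.1 r.2.2)  -- max(an1, an2, an3)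
  ((if r.1 = maxScore then [1] else []) ++
   (if r.2.1 = maxScore then [2] else []) ++
   (if r.2.2 = maxScore then [3] else []))

-- ===== PORT B =====
-- sum(answers[r::L].count(p[r]) for r in range(L)); the step L is positive, so the
-- strided slice? is always `some` (getD [] is exact), and r < L makes pyGetD exact.
def scoreOf (p : List Int) (answers : List Int) : Int :=
  ((PySem.List.pyRange 0 (p.length : Int) 1).map
    (fun r => (((PySem.List.slice? answers (some r) none (p.length : Int)).getD []).count
                 (PySem.List.pyGetD p r 0) : Int))).sum

def solution_alt (answers : List Int) : List Int :=
  let scores : List Int := [sp1L, sp2L, sp3L].foldl (fun acc p => acc ++ [scoreOf p answers]) []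
  let best : Int := ((PySem.List.max? scores (fun x => x)).getD 0)  -- scores nonempty, max total
  (PySem.List.enumerate scores 0).filterMap
    (fun ip => if ip.2 = best then some (ip.1 + 1) else none)

-- ===== PRECONDITION & SPEC =====
def Spec_solution (answers : List Int) (out : List Int) : Prop := out = solution_alt answers
instance (answers : List Int) (out : List Int) : Decidable (Spec_solution answers out) := by unfold Spec_solution; infer_instance

-- ===== CLAIM (what is proved, stated in full; the proofs are below) =====
def Claim_equal_solution : Prop := ∀ (answers : List Int), Dom_solution answers → Spec_solution answers (solution answers)

-- ===== LEMMAS AND PROOFS =====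

-- reference count: matches of xs against pattern p starting at logical position k
def cnt (p : List Int) (k : Nat) : List Int → Nat
  | [] => 0
  | a :: t => (if a = p.getD (k % p.length) 0 then 1 else 0) + cnt p (k + 1) t

-- every L ys: elements of ys at indices 0, L, 2L, …  (the strided slice ys[0::L])
def every (L : Nat) : List Int → List Int
  | [] => []
  | a :: t => a :: every L (t.drop (L - 1))
termination_by xs => xs.length
decreasing_by simp

theorem loopA_eq (xs : List Int) :
    ∀ (k : Nat) (an1 an2 an3 : Int),
      loopA xs (k % 5) (k % 8) (k % 10) an1 an2 an3
        = (an1 + (cnt sp1L k xs : Int), an2 + (cnt sp2L k xs : Int),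
           an3 + (cnt sp3L k xs : Int)) := by
  induction xs with
  | nil => intro k an1 an2 an3; simp [loopA, cnt]
  | cons a t ih =>
      intro k an1 an2 an3
      have h1 : (if k % 5 = 4 then 0 else k % 5 + 1) = (k + 1) % 5 := by
        by_cases h : k % 5 = 4 <;> simp [h] <;> omega
      have h2 : (if k % 8 = 7 then 0 else k % 8 + 1) = (k + 1) % 8 := by
        by_cases h : k % 8 = 7 <;> simp [h] <;> omega
      have h3 : (if k % 10 = 9 then 0 else k % 10 + 1) = (k + 1) % 10 := by
        by_cases h : k % 10 = 9 <;> simp [h] <;> omega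
      have l1 : k % sp1L.length = k % 5 := by simp [sp1L]
      have l2 : k % sp2L.length = k % 8 := by simp [sp2L]
      have l3 : k % sp3L.length = k % 10 := by simp [sp3L]
      simp only [loopA, h1, h2, h3, ih (k + 1), cnt, l1, l2, l3]
      refine Prod.ext ?_ (Prod.ext ?_ ?_) <;> simp <;> split_ifs <;> omega

theorem loopA_counts (xs : List Int) :
    loopA xs 0 0 0 0 0 0
      = ((cnt sp1L 0 xs : Int), (cnt sp2L 0 xs : Int), (cnt sp3L 0 xs : Int)) := by
  have := loopA_eq xs 0 0 0 0
  simpa using this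

theorem filterMap_range_every (L : Nat) (hL : 0 < L) (ys : List Int) :
    (List.range ((ys.length + L - 1) / L)).filterMap (fun k => ys[L * k]?) = every L ys := by
  induction ys using every.induct L with
  | case1 => simp [every]
  | case2 a t ih =>
      have hd : (t.drop (L-1)).length = t.length - (L-1) := by simp
      have hlen1 : ((a :: t).length + L - 1) / L = t.length / L + 1 := by
        simp only [List.length_cons]
        have : t.length + 1 + L - 1 = t.length + L := by omega
        rw [this, Nat.add_div_right _ hL]
      have hlen2 : ((t.drop (L-1)).length + L - 1) / L = t.length / L := by
        rw [hd]
        by_cases h : L - 1 ≤ t.length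
        · have : t.length - (L-1) + L - 1 = t.length := by omega
          rw [this]
        · have h1 : t.length - (L-1) = 0 := by omega
          rw [h1, Nat.div_eq_of_lt (by omega), Nat.div_eq_of_lt (by omega)]
      rw [hlen1, List.range_succ_eq_map, List.filterMap_cons]
      simp only [Nat.mul_zero, List.getElem?_cons_zero]
      rw [List.filterMap_map]
      have hfun : ∀ k, ((fun k => (a :: t)[L * k]?) ∘ Nat.succ) k = (t.drop (L-1))[L * k]? := by
        intro k
        simp only [Function.comp]
        have h1 : L * (k + 1) = ((L - 1) + L * k) + 1 := by
          have h2 : L * (k + 1) = L * k + L := by ring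
          omega
        rw [Nat.succ_eq_add_one, h1]
        rw [List.getElem?_cons_succ, List.getElem?_drop]
      rw [funext hfun]
      rw [← hlen2, ih]
      simp [every]


theorem slice_eq_every (xs : List Int) (r L : Nat) (hL : 0 < L) :
    PySem.List.slice? xs (some (r : Int)) none (L : Int) = some (every L (xs.drop r)) := by
  unfold PySem.List.slice? PySem.List.sliceIndices
  have hLne : ((L : Int) = 0) = False := by
    simp; omega
  have hLnlt : ((L : Int) < 0) = False := by simp
  have hr0 : ((r : Int) < 0) = False := by simp
  have hL0 : (0 < (L : Int)) = True := by simp; omega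
  simp only [hLne, hLnlt, hr0, hL0, if_false, if_true]
  by_cases hlt : r < xs.length
  · have hmin : min (r : Int) (xs.length : Int) = (r : Int) := by
      apply min_eq_left; exact_mod_cast Nat.le_of_lt hlt
    have hcond : ((r : Int) < (xs.length : Int)) = True := by simp; exact_mod_cast hlt
    simp only [hmin, hcond, if_true]
    have hc1 : ((xs.length : Int) - (r : Int) + (L : Int) - 1) = ((xs.length - r + L - 1 : Nat) : Int) := by
      omega
    rw [hc1, ← Int.natCast_ediv, Int.toNat_natCast]
    have hfun : ∀ k ∈ List.range ((xs.length - r + L - 1) / L),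
        xs[((r : Int) + (L : Int) * (k : Int)).toNat]? = (xs.drop r)[L * k]? := by
      intro k _
      have h1 : ((r : Int) + (L : Int) * (k : Int)).toNat = r + L * k := by
        omega
      rw [h1, List.getElem?_drop]
    rw [List.filterMap_congr hfun]
    have hlen : (xs.drop r).length = xs.length - r := by simp
    rw [← hlen]
    exact congrArg some (filterMap_range_every L hL (xs.drop r))
  · have hmin : min (r : Int) (xs.length : Int) = (xs.length : Int) := by
      apply min_eq_right; exact_mod_cast Nat.le_of_not_lt hlt
    have hcond : ((xs.length : Int) < (xs.length : Int)) = False := by simp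
    simp only [hmin, hcond, if_false]
    rw [List.drop_eq_nil_of_le (Nat.le_of_not_lt hlt)]
    simp [every]


theorem sum_every_cnt (p : List Int) (hL : 0 < p.length) (xs : List Int) : ∀ k,
    ((List.range p.length).map
       (fun r => (every p.length (xs.drop r)).count (p.getD ((k + r) % p.length) 0))).sum
      = cnt p k xs := by
  obtain ⟨m, hm⟩ : ∃ m, p.length = m + 1 := ⟨p.length - 1, by omega⟩
  induction xs with
  | nil =>
      intro k
      simp [every, cnt]
  | cons a t ih =>
      intro k
      rw [cnt.eq_def]
      simp only [hm]
      simp only [hm] at ih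
      rw [List.range_succ_eq_map, List.map_cons, List.sum_cons, List.map_map]
      have h0 : (every (m + 1) ((a :: t).drop 0)).count (p.getD ((k + 0) % (m + 1)) 0)
          = (every (m + 1) (t.drop m)).count (p.getD (k % (m + 1)) 0)
            + (if a = p.getD (k % (m + 1)) 0 then 1 else 0) := by
        rw [List.drop_zero, every, Nat.add_zero, List.count_cons]
        simp [beq_iff_eq]
      have hsucc : ∀ r,
          ((fun r => (every (m + 1) ((a :: t).drop r)).count (p.getD ((k + r) % (m + 1)) 0))
              ∘ Nat.succ) r
            = (every (m + 1) (t.drop r)).count (p.getD ((k + 1 + r) % (m + 1)) 0) := by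
        intro r
        simp only [Function.comp, Nat.succ_eq_add_one, List.drop_succ_cons]
        have h2 : k + (r + 1) = k + 1 + r := by omega
        rw [h2]
      rw [funext hsucc]
      rw [← ih (k + 1)]
      conv_rhs => rw [List.range_succ, List.map_append, List.sum_append]
      have hlast : (k + 1 + m) % (m + 1) = k % (m + 1) := by
        have h1 : k + 1 + m = k + (m + 1) := by omega
        rw [h1, Nat.add_mod_right]
      simp only [List.map_cons, List.sum_cons, List.map_nil, List.sum_nil, hlast]
      rw [h0]
      omega


theorem scoreOf_eq (p : List Int) (hp : p ≠ []) (xs : List Int) :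
    scoreOf p xs = (cnt p 0 xs : Int) := by
  have hL : 0 < p.length := List.length_pos_iff.mpr hp
  unfold scoreOf
  rw [PySem.List.pyRange_one]
  have ht : ((p.length : Int) - 0).toNat = p.length := by omega
  rw [ht, List.map_map]
  have hfun : ∀ r ∈ List.range p.length,
      ((fun ri : Int => (((PySem.List.slice? xs (some ri) none (p.length : Int)).getD []).count
          (PySem.List.pyGetD p ri 0) : Int)) ∘ (fun k : Nat => (0 : Int) + (k : Int))) r
        = (((every p.length (xs.drop r)).count (p.getD ((0 + r) % p.length) 0) : Nat) : Int) := by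
    intro r hr
    have hrL : r < p.length := List.mem_range.mp hr
    simp only [Function.comp, zero_add]
    rw [slice_eq_every xs r p.length hL, Option.getD_some, PySem.List.pyGetD_natCast]
    rw [Nat.mod_eq_of_lt hrL]
  rw [List.map_congr_left hfun]
  rw [show (fun r => (((every p.length (xs.drop r)).count (p.getD ((0 + r) % p.length) 0) : Nat) : Int))
        = ((Nat.cast : Nat → Int) ∘ fun r => ((every p.length (xs.drop r)).count (p.getD ((0 + r) % p.length) 0) : Nat)) from rfl]
  rw [← List.map_map, ← Nat.cast_list_sum, sum_every_cnt p hL xs 0]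

-- ===== VERDICT (by name: the statement is the Claim_ definition above) =====
theorem solution_spec : Claim_equal_solution := by
  intro answers _
  unfold Spec_solution solution solution_alt
  rw [loopA_counts]
  rw [show ([sp1L, sp2L, sp3L].foldl (fun acc p => acc ++ [scoreOf p answers]) [])
        = [(cnt sp1L 0 answers : Int), (cnt sp2L 0 answers : Int), (cnt sp3L 0 answers : Int)] by
      simp [List.foldl, scoreOf_eq sp1L (by decide), scoreOf_eq sp2L (by decide),
        scoreOf_eq sp3L (by decide)]]
  generalize ((cnt sp1L 0 answers : Nat) : Int) = c1
  generalize ((cnt sp2L 0 answers : Nat) : Int) = c2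
  generalize ((cnt sp3L 0 answers : Nat) : Int) = c3
  have hmax : ((PySem.List.max? [c1, c2, c3] (fun x => x)).getD 0) = max c1 (max c2 c3) := by
    rw [PySem.List.max?_id_cons]
    simp [List.foldl, max_assoc]
  simp only [hmax, PySem.List.enumerate_cons, PySem.List.enumerate_nil,
    List.filterMap_cons, List.filterMap_nil]
  generalize hM : max c1 (max c2 c3) = M
  by_cases h1 : c1 = M <;>
    by_cases h2 : c2 = M <;>
      by_cases h3 : c3 = M <;>
        simp [h1, h2, h3]
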